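-- pv_equiv track=rewrite | github.com/jyanneperez/fsds_grp6 | app/utils/lookup.py | rule_based_shelf_life
-- ===== SOURCE A (Python) =====
-- def rule_based_shelf_life(product_name):
--     name = product_name.lower()
--     if any(x in name for x in ["milk", "yogurt", "brie", "fresh", "ricotta", "cottage cheese"]):
--         return 7
--     elif any(x in name for x in ["fruit", "vegetable"]):
--         return 10
--     elif any(x in name for x in ["meat", "fish"]):
--         return 14
--     elif any(x in name for x in ["canned", "snack", "soda", "chocolate", "biscuit", 'butter', 'cheddar', 'swiss cheese', 'parmesan']):
--         return 180
--     else: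
--         return 0
-- ===== SOURCE B (Python) =====
-- _KEYWORD_DAYS = {
--     "milk": 7, "yogurt": 7, "brie": 7, "fresh": 7, "ricotta": 7, "cottage cheese": 7,
--     "fruit": 10, "vegetable": 10,
--     "meat": 14, "fish": 14,
--     "canned": 180, "snack": 180, "soda": 180, "chocolate": 180, "biscuit": 180,
--     "butter": 180, "cheddar": 180, "swiss cheese": 180, "parmesan": 180,
-- }
--
--
-- def rule_based_shelf_life(product_name):
--     # Minimum shelf life over ALL matching keywords (default 0).  Equivalent to the
--     # original first-match cascade because its tier priority order coincides with
--     # ascending day values: 7 < 10 < 14 < 180.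
--     name = product_name.lower()
--     return min((d for k, d in _KEYWORD_DAYS.items() if k in name), default=0)
-- ===== Notes on version B (the rewrite author's own statement) =====
-- stated objective: alternative
-- what changed: Replaces the ordered first-match if/elif cascade with a flat keyword->days map and an aggregate minimum over all matching keywords (default 0), which coincides with first-match because tier priority order equals ascending day values.
import Mathlib
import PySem

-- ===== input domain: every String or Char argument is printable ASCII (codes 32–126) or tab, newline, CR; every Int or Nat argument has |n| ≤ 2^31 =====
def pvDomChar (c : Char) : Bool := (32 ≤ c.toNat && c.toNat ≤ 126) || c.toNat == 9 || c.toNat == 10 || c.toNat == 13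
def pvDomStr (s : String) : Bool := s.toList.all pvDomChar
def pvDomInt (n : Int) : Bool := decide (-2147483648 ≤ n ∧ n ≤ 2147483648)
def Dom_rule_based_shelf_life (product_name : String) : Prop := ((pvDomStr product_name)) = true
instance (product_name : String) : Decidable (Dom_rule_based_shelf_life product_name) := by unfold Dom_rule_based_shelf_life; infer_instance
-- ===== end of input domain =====

-- B replaces the first-match if/elif cascade by an aggregate minimum over a flat keyword->days map
-- (default 0); equivalent because tier priority order coincides with ascending day values (alternative; same cost).

-- ===== PORT A =====
def rule_based_shelf_life (product_name : String) : Int :=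
  let name := PySem.Str.lower product_name
  if ["milk", "yogurt", "brie", "fresh", "ricotta", "cottage cheese"].any (fun x => PySem.Str.isIn x name) then 7
  else if ["fruit", "vegetable"].any (fun x => PySem.Str.isIn x name) then 10
  else if ["meat", "fish"].any (fun x => PySem.Str.isIn x name) then 14
  else if ["canned", "snack", "soda", "chocolate", "biscuit", "butter", "cheddar", "swiss cheese", "parmesan"].any (fun x => PySem.Str.isIn x name) then 180
  else 0

-- ===== PORT B =====
-- flat keyword -> days dict (insertion order), as an association list
def keywordDays : List (String × Int) :=
  [ ("milk", 7), ("yogurt", 7), ("brie", 7), ("fresh", 7), ("ricotta", 7), ("cottage cheese", 7)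
  , ("fruit", 10), ("vegetable", 10)
  , ("meat", 14), ("fish", 14)
  , ("canned", 180), ("snack", 180), ("soda", 180), ("chocolate", 180), ("biscuit", 180)
  , ("butter", 180), ("cheddar", 180), ("swiss cheese", 180), ("parmesan", 180) ]

-- min(gen-expr of matching days, default=0): filter the dict items by 'k in name', take the days, Python min with default
def rule_based_shelf_life_alt (product_name : String) : Int :=
  let name := PySem.Str.lower product_name
  PySem.List.minD ((keywordDays.filter (fun p => PySem.Str.isIn p.1 name)).map Prod.snd) (fun x => x) 0

-- ===== PRECONDITION & SPEC =====
def Spec_rule_based_shelf_life (product_name : String) (out : Int) : Prop := out = rule_based_shelf_life_alt product_name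
instance (product_name : String) (out : Int) : Decidable (Spec_rule_based_shelf_life product_name out) := by unfold Spec_rule_based_shelf_life; infer_instance

-- ===== CLAIM (what is proved, stated in full; the proofs are below) =====
def Claim_equal_rule_based_shelf_life : Prop := ∀ (product_name : String), Dom_rule_based_shelf_life product_name → Spec_rule_based_shelf_life product_name (rule_based_shelf_life product_name)

-- ===== LEMMAS AND PROOFS =====

-- min(xs, default 0) returns d when d ∈ xs and d is a lower bound of xs.
theorem minD_of_lb (L : List Int) (d : Int) (hmem : d ∈ L) (hlb : ∀ x ∈ L, d ≤ x) :
    PySem.List.minD L (fun x => x) 0 = d := by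
  cases hq : PySem.List.min? L (fun x => x) with
  | none =>
    rw [PySem.List.min?_eq_none_iff] at hq
    subst hq; simp at hmem
  | some v =>
    have hv := PySem.List.min?_mem hq
    have h1 := PySem.List.min?_isMin hq d hmem
    have h2 := hlb v hv
    simp only [PySem.List.minD, hq, Option.getD_some]
    omega

-- membership in B's matched-days list, characterised tier by tier (q abstracts 'keyword occurs in name')
theorem mem_matched_iff (q : String → Bool) (x : Int) :
    x ∈ (keywordDays.filter (fun p => q p.1)).map Prod.snd ↔
      (x = 7 ∧ (q "milk" = true ∨ q "yogurt" = true ∨ q "brie" = true ∨ q "fresh" = true ∨ q "ricotta" = true ∨ q "cottage cheese" = true)) ∨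
      (x = 10 ∧ (q "fruit" = true ∨ q "vegetable" = true)) ∨
      (x = 14 ∧ (q "meat" = true ∨ q "fish" = true)) ∨
      (x = 180 ∧ (q "canned" = true ∨ q "snack" = true ∨ q "soda" = true ∨ q "chocolate" = true ∨ q "biscuit" = true ∨ q "butter" = true ∨ q "cheddar" = true ∨ q "swiss cheese" = true ∨ q "parmesan" = true)) := by
  constructor
  · intro hx
    simp only [List.mem_map, List.mem_filter, keywordDays, List.mem_cons, List.not_mem_nil, or_false] at hx
    obtain ⟨p, ⟨hmem, hq⟩, rfl⟩ := hx
    rcases hmem with rfl|rfl|rfl|rfl|rfl|rfl|rfl|rfl|rfl|rfl|rfl|rfl|rfl|rfl|rfl|rfl|rfl|rfl|rfl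
    exacts [Or.inl ⟨rfl, Or.inl hq⟩,
      Or.inl ⟨rfl, Or.inr (Or.inl hq)⟩,
      Or.inl ⟨rfl, Or.inr (Or.inr (Or.inl hq))⟩,
      Or.inl ⟨rfl, Or.inr (Or.inr (Or.inr (Or.inl hq)))⟩,
      Or.inl ⟨rfl, Or.inr (Or.inr (Or.inr (Or.inr (Or.inl hq))))⟩,
      Or.inl ⟨rfl, Or.inr (Or.inr (Or.inr (Or.inr (Or.inr (hq)))))⟩,
      Or.inr (Or.inl ⟨rfl, Or.inl hq⟩),
      Or.inr (Or.inl ⟨rfl, Or.inr (hq)⟩),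
      Or.inr (Or.inr (Or.inl ⟨rfl, Or.inl hq⟩)),
      Or.inr (Or.inr (Or.inl ⟨rfl, Or.inr (hq)⟩)),
      Or.inr (Or.inr (Or.inr ⟨rfl, Or.inl hq⟩)),
      Or.inr (Or.inr (Or.inr ⟨rfl, Or.inr (Or.inl hq)⟩)),
      Or.inr (Or.inr (Or.inr ⟨rfl, Or.inr (Or.inr (Or.inl hq))⟩)),
      Or.inr (Or.inr (Or.inr ⟨rfl, Or.inr (Or.inr (Or.inr (Or.inl hq)))⟩)),
      Or.inr (Or.inr (Or.inr ⟨rfl, Or.inr (Or.inr (Or.inr (Or.inr (Or.inl hq))))⟩)),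
      Or.inr (Or.inr (Or.inr ⟨rfl, Or.inr (Or.inr (Or.inr (Or.inr (Or.inr (Or.inl hq)))))⟩)),
      Or.inr (Or.inr (Or.inr ⟨rfl, Or.inr (Or.inr (Or.inr (Or.inr (Or.inr (Or.inr (Or.inl hq))))))⟩)),
      Or.inr (Or.inr (Or.inr ⟨rfl, Or.inr (Or.inr (Or.inr (Or.inr (Or.inr (Or.inr (Or.inr (Or.inl hq)))))))⟩)),
      Or.inr (Or.inr (Or.inr ⟨rfl, Or.inr (Or.inr (Or.inr (Or.inr (Or.inr (Or.inr (Or.inr (Or.inr (hq))))))))⟩))]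
  · intro h
    apply List.mem_map.mpr
    rcases h with ⟨rfl, (hq|hq|hq|hq|hq|hq)⟩|⟨rfl, (hq|hq)⟩|⟨rfl, (hq|hq)⟩|⟨rfl, (hq|hq|hq|hq|hq|hq|hq|hq|hq)⟩
    exacts [⟨("milk",7), List.mem_filter.mpr ⟨by simp [keywordDays], hq⟩, rfl⟩,
      ⟨("yogurt",7), List.mem_filter.mpr ⟨by simp [keywordDays], hq⟩, rfl⟩,
      ⟨("brie",7), List.mem_filter.mpr ⟨by simp [keywordDays], hq⟩, rfl⟩,
      ⟨("fresh",7), List.mem_filter.mpr ⟨by simp [keywordDays], hq⟩, rfl⟩,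
      ⟨("ricotta",7), List.mem_filter.mpr ⟨by simp [keywordDays], hq⟩, rfl⟩,
      ⟨("cottage cheese",7), List.mem_filter.mpr ⟨by simp [keywordDays], hq⟩, rfl⟩,
      ⟨("fruit",10), List.mem_filter.mpr ⟨by simp [keywordDays], hq⟩, rfl⟩,
      ⟨("vegetable",10), List.mem_filter.mpr ⟨by simp [keywordDays], hq⟩, rfl⟩,
      ⟨("meat",14), List.mem_filter.mpr ⟨by simp [keywordDays], hq⟩, rfl⟩,
      ⟨("fish",14), List.mem_filter.mpr ⟨by simp [keywordDays], hq⟩, rfl⟩,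
      ⟨("canned",180), List.mem_filter.mpr ⟨by simp [keywordDays], hq⟩, rfl⟩,
      ⟨("snack",180), List.mem_filter.mpr ⟨by simp [keywordDays], hq⟩, rfl⟩,
      ⟨("soda",180), List.mem_filter.mpr ⟨by simp [keywordDays], hq⟩, rfl⟩,
      ⟨("chocolate",180), List.mem_filter.mpr ⟨by simp [keywordDays], hq⟩, rfl⟩,
      ⟨("biscuit",180), List.mem_filter.mpr ⟨by simp [keywordDays], hq⟩, rfl⟩,
      ⟨("butter",180), List.mem_filter.mpr ⟨by simp [keywordDays], hq⟩, rfl⟩,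
      ⟨("cheddar",180), List.mem_filter.mpr ⟨by simp [keywordDays], hq⟩, rfl⟩,
      ⟨("swiss cheese",180), List.mem_filter.mpr ⟨by simp [keywordDays], hq⟩, rfl⟩,
      ⟨("parmesan",180), List.mem_filter.mpr ⟨by simp [keywordDays], hq⟩, rfl⟩]

-- ===== VERDICT (by name: the statement is the Claim_ definition above) =====
set_option maxHeartbeats 1000000 in
theorem rule_based_shelf_life_spec : Claim_equal_rule_based_shelf_life := by
  intro product_name _
  show rule_based_shelf_life product_name = rule_based_shelf_life_alt product_name
  unfold rule_based_shelf_life rule_based_shelf_life_alt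
  set name := PySem.Str.lower product_name with hname
  have c1 : (["milk", "yogurt", "brie", "fresh", "ricotta", "cottage cheese"].any (fun x => PySem.Str.isIn x name) = true) ↔ (PySem.Str.isIn "milk" name = true ∨ PySem.Str.isIn "yogurt" name = true ∨ PySem.Str.isIn "brie" name = true ∨ PySem.Str.isIn "fresh" name = true ∨ PySem.Str.isIn "ricotta" name = true ∨ PySem.Str.isIn "cottage cheese" name = true) := by
    simp
  have c2 : (["fruit", "vegetable"].any (fun x => PySem.Str.isIn x name) = true) ↔ (PySem.Str.isIn "fruit" name = true ∨ PySem.Str.isIn "vegetable" name = true) := by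
    simp
  have c3 : (["meat", "fish"].any (fun x => PySem.Str.isIn x name) = true) ↔ (PySem.Str.isIn "meat" name = true ∨ PySem.Str.isIn "fish" name = true) := by
    simp
  have c4 : (["canned", "snack", "soda", "chocolate", "biscuit", "butter", "cheddar", "swiss cheese", "parmesan"].any (fun x => PySem.Str.isIn x name) = true) ↔ (PySem.Str.isIn "canned" name = true ∨ PySem.Str.isIn "snack" name = true ∨ PySem.Str.isIn "soda" name = true ∨ PySem.Str.isIn "chocolate" name = true ∨ PySem.Str.isIn "biscuit" name = true ∨ PySem.Str.isIn "butter" name = true ∨ PySem.Str.isIn "cheddar" name = true ∨ PySem.Str.isIn "swiss cheese" name = true ∨ PySem.Str.isIn "parmesan" name = true) := by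
    simp
  have hmem := mem_matched_iff (fun k => PySem.Str.isIn k name)
  by_cases h1 : (PySem.Str.isIn "milk" name = true ∨ PySem.Str.isIn "yogurt" name = true ∨ PySem.Str.isIn "brie" name = true ∨ PySem.Str.isIn "fresh" name = true ∨ PySem.Str.isIn "ricotta" name = true ∨ PySem.Str.isIn "cottage cheese" name = true)
  · rw [if_pos (c1.mpr h1)]
    refine (minD_of_lb _ 7 ((hmem 7).2 (Or.inl ⟨rfl, h1⟩)) ?_).symm
    intro x hx
    rcases (hmem x).1 hx with ⟨rfl,_⟩|⟨rfl,_⟩|⟨rfl,_⟩|⟨rfl,_⟩ <;> omega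
  · rw [if_neg (fun hc => h1 (c1.mp hc))]
    by_cases h2 : (PySem.Str.isIn "fruit" name = true ∨ PySem.Str.isIn "vegetable" name = true)
    · rw [if_pos (c2.mpr h2)]
      refine (minD_of_lb _ 10 ((hmem 10).2 (Or.inr (Or.inl ⟨rfl, h2⟩))) ?_).symm
      intro x hx
      rcases (hmem x).1 hx with ⟨rfl,h⟩|⟨rfl,_⟩|⟨rfl,_⟩|⟨rfl,_⟩ <;> first | omega | exact absurd h h1
    · rw [if_neg (fun hc => h2 (c2.mp hc))]
      by_cases h3 : (PySem.Str.isIn "meat" name = true ∨ PySem.Str.isIn "fish" name = true)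
      · rw [if_pos (c3.mpr h3)]
        refine (minD_of_lb _ 14 ((hmem 14).2 (Or.inr (Or.inr (Or.inl ⟨rfl, h3⟩)))) ?_).symm
        intro x hx
        rcases (hmem x).1 hx with ⟨rfl,h⟩|⟨rfl,h⟩|⟨rfl,_⟩|⟨rfl,_⟩ <;> first | omega | exact absurd h h1 | exact absurd h h2
      · rw [if_neg (fun hc => h3 (c3.mp hc))]
        by_cases h4 : (PySem.Str.isIn "canned" name = true ∨ PySem.Str.isIn "snack" name = true ∨ PySem.Str.isIn "soda" name = true ∨ PySem.Str.isIn "chocolate" name = true ∨ PySem.Str.isIn "biscuit" name = true ∨ PySem.Str.isIn "butter" name = true ∨ PySem.Str.isIn "cheddar" name = true ∨ PySem.Str.isIn "swiss cheese" name = true ∨ PySem.Str.isIn "parmesan" name = true)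
        · rw [if_pos (c4.mpr h4)]
          refine (minD_of_lb _ 180 ((hmem 180).2 (Or.inr (Or.inr (Or.inr ⟨rfl, h4⟩)))) ?_).symm
          intro x hx
          rcases (hmem x).1 hx with ⟨rfl,h⟩|⟨rfl,h⟩|⟨rfl,h⟩|⟨rfl,_⟩ <;> first | omega | exact absurd h h1 | exact absurd h h2 | exact absurd h h3
        · rw [if_neg (fun hc => h4 (c4.mp hc))]
          have hLnil : (keywordDays.filter (fun p => PySem.Str.isIn p.1 name)).map Prod.snd = [] := by
            rw [List.eq_nil_iff_forall_not_mem]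
            intro x hx
            rcases (hmem x).1 hx with ⟨_,h⟩|⟨_,h⟩|⟨_,h⟩|⟨_,h⟩
            · exact h1 h
            · exact h2 h
            · exact h3 h
            · exact h4 h
          simp only [hLnil, PySem.List.minD, PySem.List.min?, List.foldl_nil, Option.getD_none]
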